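-- pv_equiv track=rewrite | github.com/hwahyeon/solved-algorithms | Python/Codewars | Unique Strings.py | uniq_count
-- ===== SOURCE A (Python) =====
-- import math
--
-- def uniq_count(s):
--     s = s.upper()
--     l = []
--     for i in set(s):
--         l.append(s.count(i))
--     r = 1
--     for j in l:
--         r *= math.factorial(j)
--     return math.factorial(len(s))//r
-- ===== SOURCE B (Python) =====
-- import math
--
-- def uniq_count(s):
--     s = s.upper()
--     counts = {}
--     for ch in s:
--         counts[ch] = counts.get(ch, 0) + 1
--     total = 0
--     result = 1
--     for c in counts.values():
--         total += c
--         result *= math.comb(total, c)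
--     return result
-- ===== Notes on version B (the rewrite author's own statement) =====
-- stated objective: alternative
-- what changed: A rescans the string with s.count for each distinct character and divides the full factorial of len(s) by a product of factorials; B builds the frequency table in one pass over the string and computes the multinomial incrementally as a product of binomial coefficients math.comb(running_total, c), never forming len(s)! or performing a big-integer division.
import Mathlib
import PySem

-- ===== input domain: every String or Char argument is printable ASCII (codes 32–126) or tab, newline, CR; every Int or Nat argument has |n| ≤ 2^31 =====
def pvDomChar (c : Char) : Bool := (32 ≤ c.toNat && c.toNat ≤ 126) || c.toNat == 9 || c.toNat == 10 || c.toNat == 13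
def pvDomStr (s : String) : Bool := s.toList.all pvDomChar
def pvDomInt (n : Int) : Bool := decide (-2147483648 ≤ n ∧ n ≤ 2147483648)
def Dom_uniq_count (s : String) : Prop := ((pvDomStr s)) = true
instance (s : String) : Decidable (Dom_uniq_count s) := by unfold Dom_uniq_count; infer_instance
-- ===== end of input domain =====

-- B replaces A's set + per-character rescans + full factorials by a one-pass frequency
-- dict followed by an incremental product of binomial coefficients, never forming n!;
-- objective: alternative decomposition.

-- ===== PORT A =====
-- A: s = s.upper(); l = [s.count(i) for i in set(s)]; r = prod(factorial(j) for j in l);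
--    return factorial(len(s)) // r.  (The product over set(s) is independent of set
--    iteration order, so consuming PySem.Set's first-occurrence order is exact.)
def uniq_count (s : String) : Int :=
  let cs := PySem.Chars.upper s.toList
  let l : List Nat :=
    (PySem.Set.ofList cs).foldl (fun acc i => acc ++ [PySem.Chars.count cs [i]]) []
  let r : Nat := l.foldl (fun r j => r * Nat.factorial j) 1
  PySem.Int.floordiv ((Nat.factorial cs.length : Nat) : Int) (r : Int)

-- ===== PORT B =====
-- B: one pass building a count dict, then total/result accumulators with math.comb
--    (math.comb total c = Nat.choose; both arguments are non-negative here).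
def uniq_count_alt (s : String) : Int :=
  let cs := PySem.Chars.upper s.toList
  let counts : PySem.Dict Char Int :=
    cs.foldl (fun d ch => d.insert ch (d.getD ch 0 + 1)) PySem.Dict.empty
  let p : Int × Int :=
    counts.values.foldl
      (fun p c => (p.1 + c, p.2 * (Nat.choose (p.1 + c).toNat c.toNat : Int))) (0, 1)
  p.2

-- ===== PRECONDITION & SPEC =====
def Spec_uniq_count (s : String) (out : Int) : Prop := out = uniq_count_alt s
instance (s : String) (out : Int) : Decidable (Spec_uniq_count s out) := by unfold Spec_uniq_count; infer_instance

-- ===== CLAIM (what is proved, stated in full; the proofs are below) =====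
def Claim_equal_uniq_count : Prop := ∀ (s : String), Dom_uniq_count s → Spec_uniq_count s (uniq_count s)

-- ===== LEMMAS AND PROOFS =====

-- Python's s.count(i) for a single character i is List.count (specific to how the two
-- ports consume counts; PySem has no named lemma for a one-character needle).
theorem count_go_singleton (c : Char) : ∀ (fuel : Nat) (cs : List Char) (acc : Nat),
    cs.length ≤ fuel → PySem.Chars.count.go [c] fuel cs acc = acc + cs.count c := by
  intro fuel
  induction fuel with
  | zero => intro cs acc h; cases cs with
    | nil => simp [PySem.Chars.count.go]
    | cons a t => simp at h
  | succ n ih =>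
    intro cs acc h
    cases cs with
    | nil => simp [PySem.Chars.count.go]
    | cons a t =>
      simp only [PySem.Chars.count.go]
      simp only [List.length_cons, Nat.add_le_add_iff_right] at h
      by_cases hc : [c].isPrefixOf (a :: t) = true
      · rw [if_pos hc, List.length_singleton, List.drop_one, List.tail_cons,
          ih t (acc + 1) h]
        simp_all [List.isPrefixOf]
        omega
      · rw [if_neg hc, ih t acc h]
        simp only [List.isPrefixOf, Bool.and_true, beq_iff_eq] at hc
        simp [List.count_cons]
        exact fun h2 => hc h2.symm

theorem chars_count_singleton (cs : List Char) (c : Char) :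
    PySem.Chars.count cs [c] = cs.count c := by
  simp [PySem.Chars.count, count_go_singleton c cs.length cs 0 le_rfl]

-- The Nat version of B's accumulator loop.
def natFold (L : List Nat) (t r : Nat) : Nat × Nat :=
  L.foldl (fun p c => (p.1 + c, p.2 * Nat.choose (p.1 + c) c)) (t, r)

-- B's Int loop over the casts of the Nat counts is the cast of the Nat loop.
theorem intFold_cast (L : List Nat) : ∀ (t r : Nat),
    (L.map (Nat.cast : Nat → Int)).foldl
      (fun (p : Int × Int) (c : Int) =>
        (p.1 + c, p.2 * (Nat.choose (p.1 + c).toNat c.toNat : Int)))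
      ((t : Int), (r : Int))
    = (((natFold L t r).1 : Int), ((natFold L t r).2 : Int)) := by
  induction L with
  | nil => intro t r; simp [natFold]
  | cons c L ih =>
    intro t r
    simp only [natFold, List.map_cons, List.foldl_cons]
    have h1 : ((t : Int) + (c : Int)) = ((t + c : Nat) : Int) := by push_cast; ring
    rw [h1]
    have h2 : ((t + c : Nat) : Int).toNat = t + c := Int.toNat_natCast _
    have h3 : ((c : Int)).toNat = c := Int.toNat_natCast _
    rw [h2, h3]
    rw [← Nat.cast_mul]
    exact ih (t + c) (r * Nat.choose (t + c) c)

-- Loop invariant: the running binomial product times the remaining factorials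
-- reconstructs the factorial of the running total.
theorem natFold_invariant (L : List Nat) : ∀ (t r : Nat),
    (natFold L t r).2 * (L.map Nat.factorial).prod * Nat.factorial t
      = r * Nat.factorial (t + L.sum) := by
  induction L with
  | nil => intro t r; simp [natFold]
  | cons c L ih =>
    intro t r
    simp only [natFold, List.foldl_cons, List.map_cons, List.prod_cons, List.sum_cons]
    have key := ih (t + c) (r * Nat.choose (t + c) c)
    have hcomb : Nat.choose (t + c) c * Nat.factorial c * Nat.factorial t
        = Nat.factorial (t + c) := by
      have := Nat.add_choose_mul_factorial_mul_factorial t c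
      calc Nat.choose (t + c) c * Nat.factorial c * Nat.factorial t
          = Nat.choose (t + c) c * Nat.factorial t * Nat.factorial c := by ring
        _ = Nat.factorial (t + c) := this
    have hpos : 0 < Nat.factorial (t + c) := Nat.factorial_pos _
    apply Nat.eq_of_mul_eq_mul_left hpos
    calc Nat.factorial (t + c) *
          ((natFold L (t + c) (r * Nat.choose (t + c) c)).2 *
            (Nat.factorial c * (L.map Nat.factorial).prod) * Nat.factorial t)
        = ((natFold L (t + c) (r * Nat.choose (t + c) c)).2 *
            (L.map Nat.factorial).prod * Nat.factorial (t + c)) *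
            (Nat.factorial c * Nat.factorial t) := by ring
      _ = (r * Nat.choose (t + c) c * Nat.factorial (t + c + L.sum)) *
            (Nat.factorial c * Nat.factorial t) := by rw [key]
      _ = r * Nat.factorial (t + c + L.sum) *
            (Nat.choose (t + c) c * Nat.factorial c * Nat.factorial t) := by ring
      _ = r * Nat.factorial (t + c + L.sum) * Nat.factorial (t + c) := by rw [hcomb]
      _ = Nat.factorial (t + c) * (r * Nat.factorial (t + (c + L.sum))) := by
            rw [← Nat.add_assoc]; ring

-- The counts over the distinct characters sum to the length of the string.
theorem sum_counts_ofList (cs : List Char) :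
    ((PySem.Set.ofList cs).map (fun c => cs.count c)).sum = cs.length := by
  have hperm : (PySem.Set.ofList cs).Perm cs.dedup := by
    rw [List.perm_ext_iff_of_nodup (PySem.Set.nodup_ofList cs) cs.nodup_dedup]
    intro a
    rw [PySem.Set.mem_ofList, List.mem_dedup]
  calc ((PySem.Set.ofList cs).map (fun c => cs.count c)).sum
      = ((cs.dedup.map fun c => cs.count c)).sum := (hperm.map _).sum_eq
    _ = cs.length := List.sum_map_count_dedup_eq_length cs

-- ===== VERDICT (by name: the statement is the Claim_ definition above) =====
theorem uniq_count_spec : Claim_equal_uniq_count := by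
  intro s _
  unfold Spec_uniq_count
  simp only [uniq_count, uniq_count_alt]
  set cs := PySem.Chars.upper s.toList with hcs
  set L : List Nat := (PySem.Set.ofList cs).map (fun c => cs.count c) with hL
  -- A's list of counts is the counts of the distinct characters
  rw [PySem.List.foldl_append_singleton_eq_map, List.nil_append, List.foldl_map,
    PySem.List.foldl_congr_mem
      (l := PySem.Set.ofList cs)
      (f := fun (x : Nat) (y : Char) => x * Nat.factorial (PySem.Chars.count cs [y]))
      (g := fun (x : Nat) (y : Char) => x * Nat.factorial (cs.count y))
      (init := 1)
      (fun acc y _ => by simp only [chars_count_singleton]),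
    ← List.foldl_map (f := fun c => cs.count c)
      (g := fun (x : Nat) (j : Nat) => x * Nat.factorial j), ← hL]
  -- B's dict is Counter cs; its values are the same counts, as Python ints
  rw [PySem.Dict.foldl_insert_getD_add_one_eq_counter]
  have hvals : (PySem.Dict.counter cs).values
      = (PySem.Set.ofList cs).map (fun k => ((cs.count k : Nat) : Int)) := by
    show (PySem.Dict.counter cs).items.map Prod.snd = _
    rw [PySem.Dict.items_counter, List.map_map]
    rfl
  rw [hvals,
    show (PySem.Set.ofList cs).map (fun k => ((cs.count k : Nat) : Int))
        = L.map (Nat.cast : Nat → Int) by rw [hL, List.map_map]; rfl,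
    show ((0 : Int), (1 : Int)) = (((0 : Nat) : Int), ((1 : Nat) : Int)) by norm_num,
    intFold_cast]
  -- reduce to the Nat identity
  have hsum : L.sum = cs.length := sum_counts_ofList cs
  have hinv := natFold_invariant L 0 1
  simp only [Nat.zero_add, Nat.factorial_zero, Nat.mul_one, Nat.one_mul] at hinv
  rw [hsum] at hinv
  have hprod : L.foldl (fun r j => r * Nat.factorial j) 1 = (L.map Nat.factorial).prod := by
    rw [List.prod_eq_foldl, ← List.foldl_map]
  rw [hprod]
  have hppos : 0 < (L.map Nat.factorial).prod :=
    List.prod_pos (by intro x hx; obtain ⟨a, _, rfl⟩ := List.mem_map.mp hx; exact Nat.factorial_pos a)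
  have hdiv : Nat.factorial cs.length / (L.map Nat.factorial).prod = (natFold L 0 1).2 := by
    rw [← hinv]; exact Nat.mul_div_cancel _ hppos
  rw [PySem.Int.floordiv_natCast, hdiv]
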